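-- pv_equiv track=rewrite | github.com/hakanatas/tribonacci-gzr-steganography | tribonacci.py | gzr_to_decimal
-- ===== SOURCE A (Python) =====
-- def generate_tribonacci(max_value):
--     """
--     Belirli bir maksimum değere kadar Tribonacci dizisi üretir.
--
--     Tribonacci dizisi: T(n) = T(n-1) + T(n-2) + T(n-3)
--     Başlangıç değerleri: T(1)=1, T(2)=2, T(3)=4
--
--     Args:
--         max_value (int): Üretilecek maksimum Tribonacci sayısı
--
--     Returns:
--         list: Tribonacci sayılarının listesi [1, 2, 4, 7, 13, 24, ...]
--     """
--     if max_value < 1: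
--         return []
--
--     tribonacci = [1, 2, 4]  # İlk üç terim
--
--     while tribonacci[-1] < max_value:
--         next_term = tribonacci[-1] + tribonacci[-2] + tribonacci[-3]
--         if next_term > max_value:
--             break
--         tribonacci.append(next_term)
--
--     return tribonacci
--
-- def gzr_to_decimal(gzr_bits, tribonacci_seq=None):
--     """
--     GZR formatındaki bit dizisini onluk tabana dönüştürür.
--
--     Args:
--         gzr_bits (str): GZR bit dizisi (örn: "1001101")
--         tribonacci_seq (list, optional): Önceden hesaplanmış Tribonacci dizisi
--
--     Returns:
--         int: Onluk tabandaki sayı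
--
--     Örnek:
--         >>> gzr_to_decimal("1001101")
--         65
--         >>> # 1×1 + 0×2 + 0×4 + 1×7 + 1×13 + 0×24 + 1×44 = 65
--     """
--     if not gzr_bits or gzr_bits == "0":
--         return 0
--
--     # Tribonacci dizisini hazırla
--     bit_length = len(gzr_bits)
--     if tribonacci_seq is None:
--         tribonacci_seq = generate_tribonacci(2 ** bit_length)
--
--     # Bit pozisyonlarındaki 1'lerin karşılık geldiği Tribonacci sayılarını topla
--     result = 0
--     for i, bit in enumerate(gzr_bits):
--         if bit == '1' and i < len(tribonacci_seq):
--             result += tribonacci_seq[i]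
--
--     return result
-- ===== SOURCE B (Python) =====
-- def gzr_to_decimal(gzr_bits, tribonacci_seq=None):
--     if not gzr_bits or gzr_bits == "0":
--         return 0
--     if tribonacci_seq is not None:
--         # supplied sequence: zip truncates exactly like A's i < len(seq) guard
--         return sum(t for bit, t in zip(gzr_bits, tribonacci_seq) if bit == '1')
--     # fused single pass: rolling Tribonacci triple instead of building a list
--     result, a, b, c = 0, 1, 2, 4
--     for ch in gzr_bits:
--         if ch == '1':
--             result += a
--         a, b, c = b, c, a + b + c
--     return result
-- ===== Notes on version B (the rewrite author's own statement) =====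
-- stated objective: alternative
-- what changed: When no sequence is supplied, B fuses A's two passes (build a Tribonacci list up to 2**len, then index into it under an enumerate loop) into one pass over the bits with a rolling (a,b,c) Tribonacci triple; the supplied-sequence branch becomes a zip that truncates exactly like A's i < len(seq) guard.
import Mathlib
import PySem

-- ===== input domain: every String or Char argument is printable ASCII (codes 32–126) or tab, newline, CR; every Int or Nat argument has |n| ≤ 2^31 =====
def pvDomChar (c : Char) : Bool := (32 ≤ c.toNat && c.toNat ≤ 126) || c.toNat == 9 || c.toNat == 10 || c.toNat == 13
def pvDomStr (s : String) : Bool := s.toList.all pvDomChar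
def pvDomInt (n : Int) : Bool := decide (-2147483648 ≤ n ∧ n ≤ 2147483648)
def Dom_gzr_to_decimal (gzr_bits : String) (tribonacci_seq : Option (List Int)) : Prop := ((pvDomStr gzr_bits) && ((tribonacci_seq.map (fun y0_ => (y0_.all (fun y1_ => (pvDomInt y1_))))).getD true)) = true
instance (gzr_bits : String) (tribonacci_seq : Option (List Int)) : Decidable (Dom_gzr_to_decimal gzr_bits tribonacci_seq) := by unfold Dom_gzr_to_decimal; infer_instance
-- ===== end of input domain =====

-- B fuses A's generate-then-sum two passes (in the default-sequence branch) into one pass with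
-- a rolling Tribonacci triple; the supplied-sequence branch becomes a zip. Objective: alternative.

-- ===== PORT A =====
-- the while loop of generate_tribonacci; fuel = maxV.toNat + 1 is provably sufficient for the
-- internal call (the last element starts at 4, strictly increases each iteration, and the loop
-- only continues while it is < maxV), so the fuel never changes the result A computes.
def genLoop (fuel : Nat) (maxV : Int) (tri : List Int) : List Int :=
  match fuel with
  | 0 => tri
  | fuel + 1 =>
    match PySem.List.pyGet? tri (-1), PySem.List.pyGet? tri (-2), PySem.List.pyGet? tri (-3) with
    | some l1, some l2, some l3 =>
      if l1 < maxV then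
        if l1 + l2 + l3 > maxV then tri
        else genLoop fuel maxV (tri ++ [l1 + l2 + l3])
      else tri
    | _, _, _ => tri

def generate_tribonacci (max_value : Int) : List Int :=
  if max_value < 1 then []
  else genLoop (max_value.toNat + 1) max_value [1, 2, 4]

def gzr_to_decimal (gzr_bits : String) (tribonacci_seq : Option (List Int)) : Int :=
  if gzr_bits.toList = [] ∨ gzr_bits = "0" then 0
  else
    let bits := gzr_bits.toList
    let seq : List Int :=
      match tribonacci_seq with
      | some t => t
      | none => generate_tribonacci (2 ^ bits.length)
    (PySem.List.enumerate bits 0).foldl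
      (fun result p =>
        if p.2 = '1' ∧ p.1 < (seq.length : Int) then result + PySem.List.pyGetD seq p.1 0
        else result) 0

-- ===== PORT B =====
def gzr_to_decimal_alt (gzr_bits : String) (tribonacci_seq : Option (List Int)) : Int :=
  if gzr_bits.toList = [] ∨ gzr_bits = "0" then 0
  else
    match tribonacci_seq with
    | some seq =>
      (gzr_bits.toList.zip seq).foldl
        (fun acc p => if p.1 = '1' then acc + p.2 else acc) 0
    | none =>
      (gzr_bits.toList.foldl
        (fun (st : Int × Int × Int × Int) ch =>
          ((if ch = '1' then st.1 + st.2.1 else st.1),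
           st.2.2.1, st.2.2.2, st.2.1 + st.2.2.1 + st.2.2.2))
        (0, 1, 2, 4)).1

-- ===== PRECONDITION & SPEC =====
def Spec_gzr_to_decimal (gzr_bits : String) (tribonacci_seq : Option (List Int)) (out : Int) : Prop := out = gzr_to_decimal_alt gzr_bits tribonacci_seq
instance (gzr_bits : String) (tribonacci_seq : Option (List Int)) (out : Int) : Decidable (Spec_gzr_to_decimal gzr_bits tribonacci_seq out) := by unfold Spec_gzr_to_decimal; infer_instance

-- ===== CLAIM (what is proved, stated in full; the proofs are below) =====
def Claim_equal_gzr_to_decimal : Prop := ∀ (gzr_bits : String) (tribonacci_seq : Option (List Int)), Dom_gzr_to_decimal gzr_bits tribonacci_seq → Spec_gzr_to_decimal gzr_bits tribonacci_seq (gzr_to_decimal gzr_bits tribonacci_seq)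

-- ===== LEMMAS AND PROOFS =====

-- the Tribonacci sequence both programs are about
def F : Nat → Int
  | 0 => 1
  | 1 => 2
  | 2 => 4
  | n + 3 => F n + F (n + 1) + F (n + 2)

lemma F_add3 (n : Nat) : F (n + 3) = F n + F (n + 1) + F (n + 2) := by
  simp [F]

lemma F_le_two_pow : ∀ n : Nat, F n ≤ 2 ^ n
  | 0 => by decide
  | 1 => by decide
  | 2 => by decide
  | n + 3 => by
    have h0 := F_le_two_pow n
    have h1 := F_le_two_pow (n + 1)
    have h2 := F_le_two_pow (n + 2)
    have : F (n + 3) = F n + F (n + 1) + F (n + 2) := F_add3 n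
    rw [this]
    have e1 : (2 : Int) ^ (n + 1) = 2 ^ n * 2 := pow_succ 2 n
    have e2 : (2 : Int) ^ (n + 2) = 2 ^ n * 2 * 2 := by rw [pow_succ, pow_succ]
    have e3 : (2 : Int) ^ (n + 3) = 2 ^ n * 2 * 2 * 2 := by rw [pow_succ, pow_succ, pow_succ]
    have hp : (0 : Int) < 2 ^ n := pow_pos (by norm_num) n
    rw [e3]; rw [e1] at h1; rw [e2] at h2
    linarith

-- truncated sum of Tribonacci values at '1' bits (common spec of both programs)
def sumZip : List Char → List Int → Int
  | c :: bs, t :: ts => (if c = '1' then t else 0) + sumZip bs ts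
  | _, _ => 0

@[simp] lemma sumZip_nil_left (ts : List Int) : sumZip [] ts = 0 := by cases ts <;> rfl
@[simp] lemma sumZip_nil_right (bs : List Char) : sumZip bs [] = 0 := by cases bs <;> rfl

def sumFrom : List Char → Nat → Int
  | [], _ => 0
  | c :: bs, k => (if c = '1' then F k else 0) + sumFrom bs (k + 1)

-- A's enumerate loop computes sumZip
lemma foldl_enumerate_eq_sumZip (bits : List Char) : ∀ (seq : List Int) (k : Nat) (acc : Int),
    (PySem.List.enumerate bits (k : Int)).foldl
      (fun result p =>
        if p.2 = '1' ∧ p.1 < (seq.length : Int) then result + PySem.List.pyGetD seq p.1 0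
        else result) acc = acc + sumZip bits (seq.drop k) := by
  induction bits with
  | nil => intro seq k acc; simp [PySem.List.enumerate_nil]
  | cons c bs ih =>
    intro seq k acc
    rw [PySem.List.enumerate_cons]
    have hk1 : ((k : Int) + 1) = ((k + 1 : Nat) : Int) := by push_cast; ring
    rcases hdk : seq.drop k with _ | ⟨t, ts⟩
    · -- k ≥ seq.length: guard false, both tails empty
      have hk : seq.length ≤ k := by
        by_contra h
        have : seq.drop k ≠ [] := by
          simp [List.drop_eq_nil_iff]; omega
        exact this hdk
      have hdk1 : seq.drop (k + 1) = [] := by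
        simp [List.drop_eq_nil_iff]; omega
      simp only [List.foldl_cons]
      rw [hk1, ih seq (k + 1)]
      have hguard : ¬ (c = '1' ∧ (k : Int) < (seq.length : Int)) := by
        rintro ⟨-, h⟩; exact absurd (by exact_mod_cast h) (not_lt.mpr hk)
      rw [if_neg hguard, hdk1]
      simp
    · -- k < seq.length, head of the drop is seq.getD k 0
      have hk : k < seq.length := by
        by_contra h
        have : seq.drop k = [] := by simp [List.drop_eq_nil_iff]; omega
        rw [this] at hdk; cases hdk
      have ht : seq.getD k 0 = t := by
        have h := congrArg (fun l => l[0]?) hdk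
        have hk0 : seq[k]? = some t := by simpa using h
        simp [List.getD, hk0]
      have hdk1 : seq.drop (k + 1) = ts := by
        have : seq.drop (k + 1) = (seq.drop k).drop 1 := by
          rw [List.drop_drop]
        rw [this, hdk]; rfl
      simp only [List.foldl_cons]
      rw [hk1, ih seq (k + 1), hdk1]
      have hg : ((k : Int) < (seq.length : Int)) := by exact_mod_cast hk
      by_cases hc : c = '1'
      · rw [if_pos ⟨hc, hg⟩]
        rw [PySem.List.pyGetD_natCast, ht]
        simp [sumZip, hc]; ring
      · rw [if_neg (by rintro ⟨h, -⟩; exact hc h)]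
        simp [sumZip, hc]

-- B's zip loop computes sumZip
lemma foldl_zip_eq_sumZip (bits : List Char) : ∀ (seq : List Int) (acc : Int),
    (bits.zip seq).foldl (fun acc p => if p.1 = '1' then acc + p.2 else acc) acc
      = acc + sumZip bits seq := by
  induction bits with
  | nil => intro seq acc; simp
  | cons c bs ih =>
    intro seq acc
    cases seq with
    | nil => simp
    | cons t ts =>
      simp only [List.zip_cons_cons, List.foldl_cons]
      rw [ih ts]
      by_cases hc : c = '1' <;> (simp [sumZip, hc]; try ring)

-- sumZip against any list that carries F k, F (k+1), … is sumFrom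
lemma sumZip_eq_sumFrom (bits : List Char) : ∀ (ts : List Int) (k : Nat),
    bits.length ≤ ts.length → (∀ i, i < bits.length → ts.getD i 0 = F (k + i)) →
    sumZip bits ts = sumFrom bits k := by
  induction bits with
  | nil => intro ts k _ _; simp [sumFrom]
  | cons c bs ih =>
    intro ts k hlen hval
    cases ts with
    | nil => simp at hlen
    | cons t tts =>
      have h0 : t = F k := by
        have := hval 0 (by simp)
        simpa using this
      have htail : ∀ i, i < bs.length → tts.getD i 0 = F ((k + 1) + i) := by
        intro i hi
        have := hval (i + 1) (by simp; omega)
        simpa [Nat.add_assoc, Nat.add_comm 1 i] using this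
      have : sumZip bs tts = sumFrom bs (k + 1) :=
        ih tts (k + 1) (by simpa using hlen) htail
      simp [sumZip, sumFrom, h0, this]

-- B's rolling loop computes sumFrom
lemma foldl_roll_eq_sumFrom (bits : List Char) : ∀ (k : Nat) (acc : Int),
    (bits.foldl
      (fun (st : Int × Int × Int × Int) ch =>
        ((if ch = '1' then st.1 + st.2.1 else st.1),
         st.2.2.1, st.2.2.2, st.2.1 + st.2.2.1 + st.2.2.2))
      (acc, F k, F (k + 1), F (k + 2))).1 = acc + sumFrom bits k := by
  induction bits with
  | nil => intro k acc; simp [sumFrom]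
  | cons c bs ih =>
    intro k acc
    simp only [List.foldl_cons]
    rw [← F_add3 k]
    have ihk := ih (k + 1) (if c = '1' then acc + F k else acc)
    rw [show (k+1)+1 = k+2 by ring, show (k+1)+2 = k+3 by ring] at ihk
    rw [ihk]
    by_cases hc : c = '1' <;> (simp [sumFrom, hc]; try ring)

-- the generate loop only ever produces prefixes of F, long enough
lemma genLoop_spec : ∀ (fuel m n : Nat), 3 ≤ m → n ≤ m + fuel →
    ∃ M, n ≤ M ∧ genLoop fuel (2 ^ n) ((List.range m).map F) = (List.range M).map F := by
  intro fuel
  induction fuel with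
  | zero =>
    intro m n h3 hn
    exact ⟨m, by omega, rfl⟩
  | succ fuel ih =>
    intro m n h3 hn
    have hlen : ((List.range m).map F).length = m := by simp
    have hget : ∀ j, j < m → ((List.range m).map F)[j]? = some (F j) := by
      intro j hj
      simp [hj]
    have h1 : PySem.List.pyGet? ((List.range m).map F) (-1) = some (F (m - 1)) := by
      rw [PySem.List.pyGet?_neg_one, List.getLast?_eq_getElem?]
      rw [hlen, hget (m - 1) (by omega)]
    have h2 : PySem.List.pyGet? ((List.range m).map F) (-2) = some (F (m - 2)) := by
      rw [PySem.List.pyGet?_neg_ofNat _ 2 (by omega) (by omega)]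
      rw [hlen, hget (m - 2) (by omega)]
    have h3' : PySem.List.pyGet? ((List.range m).map F) (-3) = some (F (m - 3)) := by
      rw [PySem.List.pyGet?_neg_ofNat _ 3 (by omega) (by omega)]
      rw [hlen, hget (m - 3) (by omega)]
    have hnext : F (m - 1) + F (m - 2) + F (m - 3) = F m := by
      have hm : m = (m - 3) + 3 := by omega
      rw [hm, F_add3 (m - 3)]
      have e1 : (m - 3) + 3 - 1 = (m - 3) + 2 := by omega
      have e2 : (m - 3) + 3 - 2 = (m - 3) + 1 := by omega
      have e3 : (m - 3) + 3 - 3 = m - 3 := by omega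
      rw [e1, e2, e3]; ring
    -- strict upper bounds while m < n
    have hsmall : m < n → F (m - 1) < 2 ^ n ∧ F m < 2 ^ n := by
      intro hmn
      constructor
      · calc F (m - 1) ≤ 2 ^ (m - 1) := F_le_two_pow _
          _ < 2 ^ n := by
            apply pow_lt_pow_right₀ (by norm_num : (1:Int) < 2) (by omega)
      · calc F m ≤ 2 ^ m := F_le_two_pow _
          _ < 2 ^ n := by
            apply pow_lt_pow_right₀ (by norm_num : (1:Int) < 2) (by omega)
    show ∃ M, n ≤ M ∧ genLoop (fuel + 1) (2 ^ n) ((List.range m).map F) = (List.range M).map F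
    rw [genLoop, h1, h2, h3']
    simp only []
    by_cases hcont : F (m - 1) < 2 ^ n
    · rw [if_pos hcont]
      by_cases hbig : F (m - 1) + F (m - 2) + F (m - 3) > 2 ^ n
      · rw [if_pos hbig]
        refine ⟨m, ?_, rfl⟩
        by_contra h
        have := (hsmall (by omega)).2
        rw [hnext] at hbig; omega
      · rw [if_neg hbig]
        have happ : (List.range m).map F ++ [F (m - 1) + F (m - 2) + F (m - 3)]
            = (List.range (m + 1)).map F := by
          rw [hnext, List.range_succ, List.map_append]; rfl
        rw [happ]
        exact ih (m + 1) n (by omega) (by omega)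
    · rw [if_neg hcont]
      refine ⟨m, ?_, rfl⟩
      by_contra h
      exact hcont (hsmall (by omega)).1

lemma generate_eq_prefix (n : Nat) :
    ∃ M, n ≤ M ∧ generate_tribonacci (2 ^ n) = (List.range M).map F := by
  have hpos : ¬ ((2 : Int) ^ n < 1) := by
    have : (1 : Int) ≤ 2 ^ n := one_le_pow₀ (by norm_num)
    omega
  unfold generate_tribonacci
  rw [if_neg hpos]
  have hinit : ([1, 2, 4] : List Int) = (List.range 3).map F := by decide
  rw [hinit]
  have hfuel : n ≤ 3 + (((2 : Int) ^ n).toNat + 1) := by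
    have h1 : (n : Nat) < 2 ^ n := Nat.lt_two_pow_self
    have h2 : ((2 : Int) ^ n).toNat = 2 ^ n := by
      have hc : ((2 : Int) ^ n) = ((2 ^ n : Nat) : Int) := by push_cast; ring
      rw [hc, Int.toNat_natCast]
    omega
  exact genLoop_spec (((2 : Int) ^ n).toNat + 1) 3 n (by omega) hfuel

-- ===== VERDICT (by name: the statement is the Claim_ definition above) =====
theorem gzr_to_decimal_spec : Claim_equal_gzr_to_decimal := by
  intro s seq? _
  unfold Spec_gzr_to_decimal gzr_to_decimal gzr_to_decimal_alt
  by_cases hz : s.toList = [] ∨ s = "0"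
  · rw [if_pos hz, if_pos hz]
  · rw [if_neg hz, if_neg hz]
    cases seq? with
    | some seq =>
      simp only
      rw [foldl_zip_eq_sumZip]
      have := foldl_enumerate_eq_sumZip s.toList seq 0 0
      simp only [Nat.cast_zero, List.drop_zero] at this
      rw [this]
    | none =>
      simp only
      obtain ⟨M, hM, hgen⟩ := generate_eq_prefix s.toList.length
      have hA := foldl_enumerate_eq_sumZip s.toList (generate_tribonacci (2 ^ s.toList.length)) 0 0
      simp only [Nat.cast_zero, List.drop_zero] at hA
      rw [hA, hgen]
      have hlen : ((List.range M).map F).length = M := by simp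
      have hzip : sumZip s.toList ((List.range M).map F) = sumFrom s.toList 0 := by
        apply sumZip_eq_sumFrom
        · rw [hlen]; omega
        · intro i hi
          have hiM : i < M := by omega
          simp [List.getD, hiM]
      rw [hzip]
      have hroll := foldl_roll_eq_sumFrom s.toList 0 0
      have hF0 : F 0 = 1 := rfl
      have hF1 : F 1 = 2 := rfl
      have hF2 : F 2 = 4 := rfl
      rw [hF0, hF1, hF2] at hroll
      rw [hroll]
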